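-- pv_equiv track=rewrite | github.com/frozenfrank/watersort | personal/watersort/snippet.py | analyzeCounterDictionary
-- ===== SOURCE A (Python) =====
-- from collections import defaultdict
--
-- def analyzeCounterDictionary(dict: defaultdict[int]) -> tuple[int, int, int, int]: # (min, max, mode, total)
--   minKey = min(dict.keys())
--   maxKey = max(dict.keys())
--   totalOccurrences = sum(dict.values())
--
--   # Compute mode
--   modeKey = None
--   modeKeyOccurrences = 0
--   for key, occurrences in dict.items():
--     if occurrences > modeKeyOccurrences:
--       modeKey = key
--       modeKeyOccurrences = occurrences
--
--   return (minKey, maxKey, modeKey, totalOccurrences)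
-- ===== SOURCE B (Python) =====
-- def analyzeCounterDictionary(dict):
--   items = iter(dict.items())
--   try:
--     first_key, first_occ = next(items)
--   except StopIteration:
--     raise ValueError("empty dictionary")
--   minKey = maxKey = modeKey = first_key
--   modeOcc = first_occ
--   total = first_occ
--   for key, occ in items:
--     if key < minKey:
--       minKey = key
--     if key > maxKey:
--       maxKey = key
--     if occ > modeOcc:
--       modeKey = key
--       modeOcc = occ
--     total += occ
--   return (minKey, maxKey, modeKey, total)
-- ===== Notes on version B (the rewrite author's own statement) =====
-- stated objective: alternative
-- what changed: Replaces A's four separate traversals (min, max, sum, mode loop) by one single pass whose five running values are initialized from the first item; the mode keeps strict '>' so the first key attaining the maximal count wins, exactly as in A.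
-- outside the precondition, e.g. on analyzeCounterDictionary({1: 0, 2: -3}): A returns (1, 2, None, -3), B returns (1, 2, 1, -3)
import Mathlib
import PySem

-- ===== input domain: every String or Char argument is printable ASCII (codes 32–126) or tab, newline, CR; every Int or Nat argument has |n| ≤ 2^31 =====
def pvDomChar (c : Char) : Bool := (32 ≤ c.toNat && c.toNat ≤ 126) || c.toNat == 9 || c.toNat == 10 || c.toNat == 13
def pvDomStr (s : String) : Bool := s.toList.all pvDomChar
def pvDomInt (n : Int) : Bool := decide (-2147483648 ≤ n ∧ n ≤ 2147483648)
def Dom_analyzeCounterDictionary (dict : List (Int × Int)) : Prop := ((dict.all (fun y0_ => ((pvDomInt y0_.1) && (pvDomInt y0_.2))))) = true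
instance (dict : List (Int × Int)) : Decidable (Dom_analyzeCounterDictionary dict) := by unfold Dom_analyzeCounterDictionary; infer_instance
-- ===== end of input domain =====

-- B computes all four aggregates in ONE pass with running values seeded from the first item,
-- instead of A's four separate traversals; same results on Pre_ (nonempty, some positive count).

-- ===== PORT A =====
-- min()/max() raise ValueError on an empty dict and the final modeKey is Python's None when no
-- count is positive; Pre_ excludes both, so the .getD 0 defaults below are never reached under Pre_.
def analyzeCounterDictionary (dict : List (Int × Int)) : Int × Int × Int × Int :=
  let minKey : Int := (PySem.List.min? (dict.map Prod.fst) (fun k => k)).getD 0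
  let maxKey : Int := (PySem.List.max? (dict.map Prod.fst) (fun k => k)).getD 0
  let totalOccurrences : Int := (dict.map Prod.snd).foldl (· + ·) 0
  let mode : Option Int × Int :=
    dict.foldl (fun s kv => if kv.2 > s.2 then (some kv.1, kv.2) else s) (none, 0)
  (minKey, maxKey, mode.1.getD 0, totalOccurrences)

-- ===== PORT B =====
-- state = (minKey, maxKey, modeKey, modeOcc, total)
def altLoop (rest : List (Int × Int)) (s : Int × Int × Int × Int × Int) : Int × Int × Int × Int × Int :=
  rest.foldl (fun s kv =>
    ((if kv.1 < s.1 then kv.1 else s.1),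
     (if kv.1 > s.2.1 then kv.1 else s.2.1),
     (if kv.2 > s.2.2.2.1 then kv.1 else s.2.2.1),
     (if kv.2 > s.2.2.2.1 then kv.2 else s.2.2.2.1),
     s.2.2.2.2 + kv.2)) s

def analyzeCounterDictionary_alt (dict : List (Int × Int)) : Int × Int × Int × Int :=
  match dict with
  | [] => (0, 0, 0, 0)  -- Python B raises ValueError here; excluded by Pre_
  | (k, v) :: rest =>
      let r := altLoop rest (k, k, k, v, v)
      (r.1, r.2.1, r.2.2.1, r.2.2.2.2)

-- ===== PRECONDITION & SPEC =====
-- Pre_ excludes the empty dict (A raises ValueError) and dicts whose counts are all ≤ 0,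
-- on which A returns Python's None as the mode — not an int of the declared return type.
def Pre_analyzeCounterDictionary (dict : List (Int × Int)) : Prop :=
  dict ≠ [] ∧ ∃ p ∈ dict, 0 < p.2
instance (dict : List (Int × Int)) : Decidable (Pre_analyzeCounterDictionary dict) := by
  unfold Pre_analyzeCounterDictionary; infer_instance
def pvWitness_analyzeCounterDictionary : (List (Int × Int)) := [(1, 2), (3, 1)]
def Spec_analyzeCounterDictionary (dict : List (Int × Int)) (out : Int × Int × Int × Int) : Prop := out = analyzeCounterDictionary_alt dict
instance (dict : List (Int × Int)) (out : Int × Int × Int × Int) : Decidable (Spec_analyzeCounterDictionary dict out) := by unfold Spec_analyzeCounterDictionary; infer_instance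

-- ===== CLAIM (what is proved, stated in full; the proofs are below) =====
def Claim_equal_analyzeCounterDictionary : Prop := ∀ (dict : List (Int × Int)), Dom_analyzeCounterDictionary dict → Pre_analyzeCounterDictionary dict → Spec_analyzeCounterDictionary dict (analyzeCounterDictionary dict)

-- ===== LEMMAS AND PROOFS =====

-- B's single fold splits into the four independent folds.
theorem altLoop_eq (rest : List (Int × Int)) (mn mx mo mc tot : Int) :
    altLoop rest (mn, mx, mo, mc, tot) =
      (rest.foldl (fun m kv => if kv.1 < m then kv.1 else m) mn,
       rest.foldl (fun m kv => if kv.1 > m then kv.1 else m) mx,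
       (rest.foldl (fun (p : Int × Int) kv => if kv.2 > p.2 then (kv.1, kv.2) else p) (mo, mc)).1,
       (rest.foldl (fun (p : Int × Int) kv => if kv.2 > p.2 then (kv.1, kv.2) else p) (mo, mc)).2,
       rest.foldl (fun t kv => t + kv.2) tot) := by
  induction rest generalizing mn mx mo mc tot with
  | nil => simp [altLoop]
  | cons kv rest ih =>
    simp only [altLoop, List.foldl_cons] at *
    split_ifs <;> simp [ih]

theorem foldl_min_eq (rest : List (Int × Int)) (mn : Int) :
    rest.foldl (fun m kv => if kv.1 < m then kv.1 else m) mn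
      = (rest.map Prod.fst).foldl min mn := by
  rw [List.foldl_map]
  congr 1
  funext m kv
  simp only [min_def]; split_ifs <;> omega

theorem foldl_max_eq (rest : List (Int × Int)) (mx : Int) :
    rest.foldl (fun m kv => if kv.1 > m then kv.1 else m) mx
      = (rest.map Prod.fst).foldl max mx := by
  rw [List.foldl_map]
  congr 1
  funext m kv
  simp only [max_def]; split_ifs <;> omega

theorem foldl_sum_eq (rest : List (Int × Int)) (tot : Int) :
    rest.foldl (fun t kv => t + kv.2) tot
      = (rest.map Prod.snd).foldl (· + ·) tot := by
  rw [List.foldl_map]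

-- A's mode state is (none, 0) until a positive count appears; from then on it tracks
-- exactly B's (modeKey, modeOcc) pair.
theorem mode_rel (l : List (Int × Int)) (oA : Option Int) (cA mB cB : Int)
    (h : (0 < cA ∧ oA = some mB ∧ cA = cB) ∨ (oA = none ∧ cA = 0 ∧ cB ≤ 0)) :
    (let fA := l.foldl (fun s kv => if kv.2 > s.2 then (some kv.1, kv.2) else s) (oA, cA)
     let fB := l.foldl (fun (p : Int × Int) kv => if kv.2 > p.2 then (kv.1, kv.2) else p) (mB, cB)
     (0 < fA.2 ∧ fA.1 = some fB.1 ∧ fA.2 = fB.2) ∨ (fA.1 = none ∧ fA.2 = 0 ∧ fB.2 ≤ 0)) := by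
  induction l generalizing oA cA mB cB with
  | nil => simpa using h
  | cons kv l ih =>
    simp only [List.foldl_cons]
    rcases h with ⟨hpos, h1, h2⟩ | ⟨h1, h2, h3⟩
    · subst h1; subst h2
      by_cases hg : kv.2 > cA
      · simp only [hg, if_pos]
        exact ih _ _ _ _ (Or.inl ⟨by omega, rfl, rfl⟩)
      · simp only [hg, if_false]
        exact ih _ _ _ _ (Or.inl ⟨hpos, rfl, rfl⟩)
    · subst h1; subst h2
      by_cases hg1 : kv.2 > (0:Int)
      · have hg2 : kv.2 > cB := by omega
        simp only [hg1, hg2, if_pos]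
        exact ih _ _ _ _ (Or.inl ⟨by omega, rfl, rfl⟩)
      · simp only [hg1, if_false]
        by_cases hg2 : kv.2 > cB
        · simp only [hg2, if_pos]
          exact ih _ _ _ _ (Or.inr ⟨rfl, rfl, by omega⟩)
        · simp only [hg2, if_false]
          exact ih _ _ _ _ (Or.inr ⟨rfl, rfl, h3⟩)

theorem mode_pos (l : List (Int × Int)) (sA : Option Int × Int)
    (h : 0 < sA.2 ∨ ∃ p ∈ l, 0 < p.2) :
    0 < (l.foldl (fun s kv => if kv.2 > s.2 then (some kv.1, kv.2) else s) sA).2 := by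
  induction l generalizing sA with
  | nil => simpa using h
  | cons kv l ih =>
    simp only [List.foldl_cons]
    apply ih
    rcases h with hpos | ⟨p, hp, hppos⟩
    · left; split_ifs with hg
      · simpa using lt_of_lt_of_le hpos (le_of_lt hg)
      · exact hpos
    · rcases List.mem_cons.mp hp with rfl | hmem
      · left; split_ifs with hg
        · simpa using hppos
        · simp only [gt_iff_lt, not_lt] at hg; exact lt_of_lt_of_le hppos hg
      · right; exact ⟨p, hmem, hppos⟩

-- ===== VERDICT (by name: the statement is the Claim_ definition above) =====
theorem analyzeCounterDictionary_spec : Claim_equal_analyzeCounterDictionary := by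
  intro dict _ hpre
  obtain ⟨hne, hex⟩ := hpre
  unfold Spec_analyzeCounterDictionary
  match dict, hne with
  | (k, v) :: rest, _ =>
    simp only [analyzeCounterDictionary, analyzeCounterDictionary_alt, altLoop_eq]
    -- the mode seed after A consumes the head
    have hseed : ((0:Int) < (if v > (0:Int) then ((some k : Option Int), v) else (none, 0)).2
          ∧ (if v > (0:Int) then ((some k : Option Int), v) else (none, 0)).1 = some k
          ∧ (if v > (0:Int) then ((some k : Option Int), v) else (none, 0)).2 = v)
        ∨ ((if v > (0:Int) then ((some k : Option Int), v) else (none, 0)).1 = none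
          ∧ (if v > (0:Int) then ((some k : Option Int), v) else (none, 0)).2 = 0 ∧ v ≤ 0) := by
      split_ifs with hv
      · exact Or.inl ⟨hv, rfl, rfl⟩
      · exact Or.inr ⟨rfl, rfl, by omega⟩
    have hrel := mode_rel rest
      (if v > (0:Int) then ((some k : Option Int), v) else (none, 0)).1
      (if v > (0:Int) then ((some k : Option Int), v) else (none, 0)).2 k v hseed
    have hpos := mode_pos ((k, v) :: rest) (none, 0) (Or.inr hex)
    simp only [List.foldl_cons] at hpos
    simp only [Prod.mk.eta] at hrel
    rcases hrel with ⟨_, h1, _⟩ | ⟨hA1, hA2, _⟩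
    · -- assemble the four components
      simp only [List.map_cons, PySem.List.min?_id_cons, PySem.List.max?_id_cons,
        List.foldl_cons, Option.getD_some]
      refine Prod.ext ?_ (Prod.ext ?_ (Prod.ext ?_ ?_)) <;> simp only
      · rw [foldl_min_eq]
      · rw [foldl_max_eq]
      · rw [h1, Option.getD_some]
      · rw [foldl_sum_eq]; norm_num
    · -- impossible: some count is positive
      exact absurd (hA2 ▸ hpos) (lt_irrefl 0)
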